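-- pv_equiv track=rewrite | github.com/hookprobe/hookprobe | products/fortress/scripts/fts-host-agent.py | _validate_earfcn_band
-- ===== SOURCE A (Python) =====
-- from typing import Optional, Tuple
--
-- def _validate_earfcn_band(earfcn: int, claimed_band: str) -> Tuple[bool, str]:
--     """Validate that EARFCN belongs to claimed Band.
--
--     Returns:
--         Tuple of (is_valid, expected_band_for_earfcn)
--     """
--     # LTE EARFCN to Band mapping (FDD DL bands)
--     # Reference: 3GPP TS 36.101
--     earfcn_bands = [
--         (0, 599, 'B1'),       # Band 1: 2100 MHz
--         (600, 1199, 'B2'),    # Band 2: 1900 MHz (PCS)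
--         (1200, 1949, 'B3'),   # Band 3: 1800 MHz (DCS)
--         (1950, 2399, 'B4'),   # Band 4: AWS-1
--         (2400, 2649, 'B5'),   # Band 5: 850 MHz
--         (2650, 2749, 'B6'),   # Band 6: UMTS 800
--         (2750, 3449, 'B7'),   # Band 7: 2600 MHz
--         (3450, 3799, 'B8'),   # Band 8: 900 MHz
--         (3800, 4149, 'B9'),   # Band 9: 1800 MHz Japan
--         (4150, 4749, 'B10'),  # Band 10: AWS-3
--         (4750, 4949, 'B11'),  # Band 11: 1500 MHz Lower
--         (5010, 5179, 'B12'),  # Band 12: 700 MHz Lower A/B/C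
--         (5180, 5279, 'B13'),  # Band 13: 700 MHz Upper C
--         (5280, 5379, 'B14'),  # Band 14: 700 MHz Public Safety
--         (5730, 5849, 'B17'),  # Band 17: 700 MHz Lower B/C
--         (5850, 5999, 'B18'),  # Band 18: 800 MHz Lower
--         (6000, 6149, 'B19'),  # Band 19: 800 MHz Upper
--         (6150, 6449, 'B20'),  # Band 20: 800 MHz DD
--         (6450, 6599, 'B21'),  # Band 21: 1500 MHz Upper
--         (6600, 7399, 'B22'),  # Band 22: 3500 MHz
--         (7500, 7699, 'B23'),  # Band 23: 2000 MHz S-band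
--         (7700, 8039, 'B24'),  # Band 24: 1600 MHz L-band
--         (8040, 8689, 'B25'),  # Band 25: Extended PCS
--         (8690, 9039, 'B26'),  # Band 26: Extended 850
--         (9040, 9209, 'B27'),  # Band 27: 800 MHz SMR
--         (9210, 9659, 'B28'),  # Band 28: 700 MHz APT
--         (9660, 9769, 'B29'),  # Band 29: 700 MHz SDL
--         (9770, 9869, 'B30'),  # Band 30: 2300 MHz WCS
--         (9870, 9919, 'B31'),  # Band 31: 450 MHz
--         (9920, 10359, 'B32'), # Band 32: 1500 MHz L-band SDL
--         (36000, 36199, 'B33'),# Band 33: TDD 1900 MHz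
--         (36200, 36349, 'B34'),# Band 34: TDD 2000 MHz
--         (36350, 36949, 'B35'),# Band 35: TDD PCS
--         (36950, 37549, 'B36'),# Band 36: TDD PCS
--         (37550, 37749, 'B37'),# Band 37: TDD PCS Gap
--         (37750, 38249, 'B38'),# Band 38: TDD 2600 MHz
--         (38250, 38649, 'B39'),# Band 39: TDD 1900 MHz
--         (38650, 39649, 'B40'),# Band 40: TDD 2300 MHz
--         (39650, 41589, 'B41'),# Band 41: TDD 2500 MHz
--         (41590, 43589, 'B42'),# Band 42: TDD 3500 MHz
--         (43590, 45589, 'B43'),# Band 43: TDD 3700 MHz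
--         (65536, 66435, 'B65'),# Band 65: Extended Band 1
--         (66436, 67335, 'B66'),# Band 66: Extended AWS
--         (67336, 67535, 'B67'),# Band 67: 700 MHz EU SDL
--         (67536, 67835, 'B68'),# Band 68: 700 MHz ME
--         (67836, 68335, 'B69'),# Band 69: 2600 MHz SDL
--         (68336, 68585, 'B70'),# Band 70: AWS-3 Supplemental
--         (68586, 68935, 'B71'),# Band 71: 600 MHz
--         (68936, 68985, 'B72'),# Band 72: 450 MHz PMR
--         (68986, 69035, 'B73'),# Band 73: 450 MHz
--         (69036, 69465, 'B74'),# Band 74: L-band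
--         (69466, 70315, 'B75'),# Band 75: 1500 MHz SDL
--         (70316, 70365, 'B76'),# Band 76: 1500 MHz SDL
--     ]
--
--     # Normalize claimed band
--     claimed_upper = claimed_band.upper()
--     if not claimed_upper.startswith('B'):
--         claimed_upper = f'B{claimed_upper}'
--
--     # Find the band for this EARFCN
--     actual_band = None
--     for start, end, band in earfcn_bands:
--         if start <= earfcn <= end:
--             actual_band = band
--             break
--
--     if actual_band is None:
--         return True, 'Unknown'  # Can't validate, assume OK
--
--     return actual_band == claimed_upper, actual_band
-- ===== SOURCE B (Python) =====
-- from bisect import bisect_left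
-- from typing import Optional, Tuple
--
-- # Staircase encoding of the 3GPP TS 36.101 table: sorted breakpoints
-- # (upper_limit, band_number_or_None); each segment runs from the previous
-- # limit (exclusive) up to its own limit (inclusive); None marks a gap.
-- _BREAKS = [
--     (-1, None), (599, 1), (1199, 2), (1949, 3), (2399, 4), (2649, 5),
--     (2749, 6), (3449, 7), (3799, 8), (4149, 9), (4749, 10), (4949, 11),
--     (5009, None), (5179, 12), (5279, 13), (5379, 14), (5729, None),
--     (5849, 17), (5999, 18), (6149, 19), (6449, 20), (6599, 21), (7399, 22),
--     (7499, None), (7699, 23), (8039, 24), (8689, 25), (9039, 26), (9209, 27),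
--     (9659, 28), (9769, 29), (9869, 30), (9919, 31), (10359, 32),
--     (35999, None), (36199, 33), (36349, 34), (36949, 35), (37549, 36),
--     (37749, 37), (38249, 38), (38649, 39), (39649, 40), (41589, 41),
--     (43589, 42), (45589, 43), (65535, None), (66435, 65), (67335, 66),
--     (67535, 67), (67835, 68), (68335, 69), (68585, 70), (68935, 71),
--     (68985, 72), (69035, 73), (69465, 74), (70315, 75), (70365, 76),
-- ]
-- _LIMITS = [lim for lim, _ in _BREAKS]
--
--
-- def _band_number_for(earfcn: int) -> Optional[int]:
--     """Band number of the staircase segment containing earfcn, or None."""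
--     k = bisect_left(_LIMITS, earfcn)
--     if k == len(_BREAKS):
--         return None
--     return _BREAKS[k][1]
--
--
-- def _validate_earfcn_band(earfcn: int, claimed_band: str) -> Tuple[bool, str]:
--     claimed_upper = claimed_band.upper()
--     if not claimed_upper.startswith('B'):
--         claimed_upper = f'B{claimed_upper}'
--     n = _band_number_for(earfcn)
--     if n is None:
--         return True, 'Unknown'
--     actual_band = 'B' + str(n)
--     return actual_band == claimed_upper, actual_band
-- ===== Notes on version B (the rewrite author's own statement) =====
-- stated objective: alternative
-- what changed: Replaces A's linear scan over 54 (start, end, band-string) interval triples with a staircase encoding - a sorted list of (upper-limit, band-number-or-None) breakpoints, including explicit gap segments - searched with bisect_left, rendering the band string as 'B'+str(n) only on a hit.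
import Mathlib
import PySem

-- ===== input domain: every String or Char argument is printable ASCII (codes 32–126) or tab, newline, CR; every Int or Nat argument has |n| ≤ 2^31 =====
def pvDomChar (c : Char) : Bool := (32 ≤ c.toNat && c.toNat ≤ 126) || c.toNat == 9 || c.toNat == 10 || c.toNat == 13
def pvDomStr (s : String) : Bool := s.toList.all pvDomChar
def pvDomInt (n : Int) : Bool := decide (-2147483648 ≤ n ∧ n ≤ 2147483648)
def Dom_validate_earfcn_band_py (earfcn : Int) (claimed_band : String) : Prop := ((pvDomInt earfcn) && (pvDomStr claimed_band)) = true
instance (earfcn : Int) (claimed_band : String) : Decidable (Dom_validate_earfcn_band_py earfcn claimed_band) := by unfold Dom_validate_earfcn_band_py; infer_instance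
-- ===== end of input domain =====

-- B replaces A's linear scan over interval triples by a staircase table of
-- (upper-limit, band-number-or-None) breakpoints searched with bisect_left
-- (alternative data structure; same normalization, same return shape).

-- ===== PORT A =====
-- A's 3GPP table of (start, end, band) interval triples
def earfcnBands : List (Int × Int × String) :=
  [(0, 599, "B1"), (600, 1199, "B2"), (1200, 1949, "B3"), (1950, 2399, "B4"),
   (2400, 2649, "B5"), (2650, 2749, "B6"), (2750, 3449, "B7"), (3450, 3799, "B8"),
   (3800, 4149, "B9"), (4150, 4749, "B10"), (4750, 4949, "B11"), (5010, 5179, "B12"),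
   (5180, 5279, "B13"), (5280, 5379, "B14"), (5730, 5849, "B17"), (5850, 5999, "B18"),
   (6000, 6149, "B19"), (6150, 6449, "B20"), (6450, 6599, "B21"), (6600, 7399, "B22"),
   (7500, 7699, "B23"), (7700, 8039, "B24"), (8040, 8689, "B25"), (8690, 9039, "B26"),
   (9040, 9209, "B27"), (9210, 9659, "B28"), (9660, 9769, "B29"), (9770, 9869, "B30"),
   (9870, 9919, "B31"), (9920, 10359, "B32"), (36000, 36199, "B33"), (36200, 36349, "B34"),
   (36350, 36949, "B35"), (36950, 37549, "B36"), (37550, 37749, "B37"), (37750, 38249, "B38"),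
   (38250, 38649, "B39"), (38650, 39649, "B40"), (39650, 41589, "B41"), (41590, 43589, "B42"),
   (43590, 45589, "B43"), (65536, 66435, "B65"), (66436, 67335, "B66"), (67336, 67535, "B67"),
   (67536, 67835, "B68"), (67836, 68335, "B69"), (68336, 68585, "B70"), (68586, 68935, "B71"),
   (68936, 68985, "B72"), (68986, 69035, "B73"), (69036, 69465, "B74"), (69466, 70315, "B75"),
   (70316, 70365, "B76")]

-- A's for-loop with break: first interval containing earfcn
def findBandA (earfcn : Int) : List (Int × Int × String) → Option String
  | [] => none
  | (s, e, b) :: rest =>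
      if s ≤ earfcn ∧ earfcn ≤ e then some b else findBandA earfcn rest

def validate_earfcn_band_py (earfcn : Int) (claimed_band : String) : Bool × String :=
  let u := PySem.Str.upper claimed_band
  let claimed_upper := if PySem.Str.startswith u "B" then u else "B" ++ u
  match findBandA earfcn earfcnBands with
  | none => (true, "Unknown")
  | some actual_band => (actual_band == claimed_upper, actual_band)

-- ===== PORT B =====
-- Source B's _BREAKS: sorted (upper-limit, band-number-or-None) staircase breakpoints
def breaksB : List (Int × Option Int) :=
  [(-1, none), (599, some 1), (1199, some 2), (1949, some 3), (2399, some 4), (2649, some 5),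
   (2749, some 6), (3449, some 7), (3799, some 8), (4149, some 9), (4749, some 10), (4949, some 11),
   (5009, none), (5179, some 12), (5279, some 13), (5379, some 14), (5729, none),
   (5849, some 17), (5999, some 18), (6149, some 19), (6449, some 20), (6599, some 21), (7399, some 22),
   (7499, none), (7699, some 23), (8039, some 24), (8689, some 25), (9039, some 26), (9209, some 27),
   (9659, some 28), (9769, some 29), (9869, some 30), (9919, some 31), (10359, some 32),
   (35999, none), (36199, some 33), (36349, some 34), (36949, some 35), (37549, some 36),
   (37749, some 37), (38249, some 38), (38649, some 39), (39649, some 40), (41589, some 41),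
   (43589, some 42), (45589, some 43), (65535, none), (66435, some 65), (67335, some 66),
   (67535, some 67), (67835, some 68), (68335, some 69), (68585, some 70), (68935, some 71),
   (68985, some 72), (69035, some 73), (69465, some 74), (70315, some 75), (70365, some 76)]

def limitsB : List Int := breaksB.map (·.1)

-- Source B's _band_number_for: bisect_left on the limits, then read that breakpoint
-- (_BREAKS[k] with k < len is ported as getD; exact, the index is in range)
def bandNumberForB (earfcn : Int) : Option Int :=
  let k := PySem.List.bisectLeft limitsB earfcn
  if k == breaksB.length then none
  else (breaksB.getD k (0, none)).2

def validate_earfcn_band_py_alt (earfcn : Int) (claimed_band : String) : Bool × String :=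
  let u := PySem.Str.upper claimed_band
  let claimed_upper := if PySem.Str.startswith u "B" then u else "B" ++ u
  match bandNumberForB earfcn with
  | none => (true, "Unknown")
  | some n =>
      let actual_band := "B" ++ PySem.Int.toStr n
      (actual_band == claimed_upper, actual_band)

-- ===== PRECONDITION & SPEC =====
def Spec_validate_earfcn_band_py (earfcn : Int) (claimed_band : String) (out : Bool × String) : Prop := out = validate_earfcn_band_py_alt earfcn claimed_band
instance (earfcn : Int) (claimed_band : String) (out : Bool × String) : Decidable (Spec_validate_earfcn_band_py earfcn claimed_band out) := by unfold Spec_validate_earfcn_band_py; infer_instance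

-- ===== CLAIM =====
def Claim_equal_validate_earfcn_band_py : Prop := ∀ (earfcn : Int) (claimed_band : String), Dom_validate_earfcn_band_py earfcn claimed_band → Spec_validate_earfcn_band_py earfcn claimed_band (validate_earfcn_band_py earfcn claimed_band)

-- ===== LEMMAS AND PROOFS =====

-- reference semantics of Source B's table: first breakpoint with e ≤ limit
def lookB (e : Int) : List (Int × Option Int) → Option (Option Int)
  | [] => none
  | (lim, n) :: bs => if e ≤ lim then some n else lookB e bs

-- 'bs is a staircase covering of tbl above the exclusive lower bound lo'
def coversB (lo : Int) : List (Int × Option Int) → List (Int × Int × String) → Bool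
  | [], tbl => tbl.isEmpty
  | (lim, none) :: bs, tbl => decide (lo < lim) && coversB lim bs tbl
  | (lim, some n) :: bs, tbl =>
      match tbl with
      | [] => false
      | (s, e, b) :: rest =>
          decide (s = lo + 1) && decide (e = lim) && (b == "B" ++ PySem.Int.toStr n)
            && decide (lo < lim) && coversB lim bs rest

theorem findBandA_eq_none_of_lt (e : Int) (tbl : List (Int × Int × String))
    (h : ∀ t ∈ tbl, e < t.1) : findBandA e tbl = none := by
  induction tbl with
  | nil => rfl
  | cons x rest ih =>
      have hx := h x (by simp)
      simp only [findBandA]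
      rw [if_neg (by omega : ¬(x.1 ≤ e ∧ e ≤ x.2.1))]
      exact ih (fun t ht => h t (by simp [ht]))

theorem coversB_start_gt (lo : Int) (bs : List (Int × Option Int))
    (tbl : List (Int × Int × String)) (h : coversB lo bs tbl = true) :
    ∀ t ∈ tbl, lo < t.1 := by
  induction bs generalizing lo tbl with
  | nil =>
      cases tbl with
      | nil => intro t ht; simp at ht
      | cons x r => simp [coversB, List.isEmpty] at h
  | cons p bs ih =>
      obtain ⟨lim, n⟩ := p
      cases n with
      | none =>
          simp only [coversB, Bool.and_eq_true, decide_eq_true_eq] at h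
          intro t ht
          have := ih lim tbl h.2 t ht
          omega
      | some m =>
          cases tbl with
          | nil => simp [coversB] at h
          | cons x rest =>
              obtain ⟨s, e, b⟩ := x
              simp only [coversB, Bool.and_eq_true, decide_eq_true_eq] at h
              obtain ⟨⟨⟨⟨hs, he⟩, hb⟩, hlim⟩, hc⟩ := h
              intro t ht
              rcases List.mem_cons.mp ht with rfl | ht'
              · simp; omega
              · have := ih lim rest hc t ht'
                omega

theorem covers_lookup (bs : List (Int × Option Int)) (lo : Int)
    (tbl : List (Int × Int × String)) (h : coversB lo bs tbl = true)
    (e : Int) (he : lo < e) :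
    findBandA e tbl = (Option.join (lookB e bs)).map (fun n => "B" ++ PySem.Int.toStr n) := by
  induction bs generalizing lo tbl with
  | nil =>
      cases tbl with
      | nil => simp [findBandA, lookB]
      | cons x r => simp [coversB, List.isEmpty] at h
  | cons p bs ih =>
      obtain ⟨lim, n⟩ := p
      cases n with
      | none =>
          simp only [coversB, Bool.and_eq_true, decide_eq_true_eq] at h
          obtain ⟨hlim, hc⟩ := h
          by_cases hle : e ≤ lim
          · simp only [lookB, if_pos hle, Option.join, Option.map]
            exact findBandA_eq_none_of_lt e tbl
              (fun t ht => by have := coversB_start_gt lim bs tbl hc t ht; omega)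
          · simp only [lookB, if_neg hle]
            exact ih lim tbl hc (by omega)
      | some m =>
          cases tbl with
          | nil => simp [coversB] at h
          | cons x rest =>
              obtain ⟨s, en, b⟩ := x
              simp only [coversB, Bool.and_eq_true, decide_eq_true_eq, beq_iff_eq] at h
              obtain ⟨⟨⟨⟨hs, hen⟩, hb⟩, hlim⟩, hc⟩ := h
              by_cases hle : e ≤ lim
              · simp only [lookB, if_pos hle, findBandA]
                rw [if_pos (by omega : s ≤ e ∧ e ≤ en)]
                simp [hb]
              · simp only [lookB, if_neg hle, findBandA]
                rw [if_neg (by omega : ¬(s ≤ e ∧ e ≤ en))]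
                exact ih lim rest hc (by omega)

theorem lookB_of_cuts (e : Int) (bs : List (Int × Option Int)) (k : Nat)
    (hk : k ≤ bs.length)
    (hlo : ∀ j (hj : j < bs.length), j < k → bs[j].1 < e)
    (hhi : ∀ j (hj : j < bs.length), k ≤ j → e ≤ bs[j].1) :
    lookB e bs = if h : k < bs.length then some (bs[k]'h).2 else none := by
  induction bs generalizing k with
  | nil =>
      have : k = 0 := Nat.le_zero.mp hk
      subst this; simp [lookB]
  | cons p bs ih =>
      match k with
      | 0 =>
          have h0 : e ≤ p.1 := by simpa using hhi 0 (by simp) (by omega)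
          simp [lookB, h0]
      | (k'+1) =>
          have h0 : p.1 < e := by simpa using hlo 0 (by simp) (by omega)
          simp only [lookB, if_neg (by omega : ¬ e ≤ p.1)]
          rw [ih k' (by simpa using hk)
            (fun j hj hjk => by simpa using hlo (j+1) (by simp; omega) (by omega))
            (fun j hj hjk => by simpa using hhi (j+1) (by simp; omega) (by omega))]
          by_cases hlt : k' < bs.length
          · rw [dif_pos hlt, dif_pos (by simp; omega)]
            simp
          · rw [dif_neg hlt, dif_neg (by simp; omega)]

theorem bandNumberForB_eq (e : Int) :
    bandNumberForB e = Option.join (lookB e breaksB) := by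
  have hs : List.Pairwise (· ≤ ·) limitsB := by decide
  obtain ⟨hk, hlo, hhi⟩ := PySem.List.bisectLeft_spec limitsB e hs
  have hlen : limitsB.length = breaksB.length := by simp [limitsB]
  unfold bandNumberForB
  set k := PySem.List.bisectLeft limitsB e with hkdef
  clear hkdef
  rw [lookB_of_cuts e breaksB k (hlen ▸ hk)
    (fun j hj hjk => by
      have := hlo j (hlen ▸ hj) hjk
      simpa [limitsB] using this)
    (fun j hj hjk => by
      have := hhi j (hlen ▸ hj) hjk
      simpa [limitsB] using this)]
  by_cases hlt : k < breaksB.length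
  · rw [dif_pos hlt, if_neg (by simp; omega)]
    simp [List.getD_eq_getElem?_getD, List.getElem?_eq_getElem hlt]
  · have hke : k = breaksB.length := by omega
    rw [dif_neg hlt, if_pos (by simp [hke])]
    simp

theorem bridge (e : Int) :
    findBandA e earfcnBands = (bandNumberForB e).map (fun n => "B" ++ PySem.Int.toStr n) := by
  rw [bandNumberForB_eq]
  by_cases he : -2 < e
  · exact covers_lookup breaksB (-2) earfcnBands (by decide) e he
  · have hA : findBandA e earfcnBands = none :=
      findBandA_eq_none_of_lt e earfcnBands
        (fun t ht => by
          have := coversB_start_gt (-2) breaksB earfcnBands (by decide) t ht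
          omega)
    have hB : lookB e breaksB = if e ≤ -1 then some none else lookB e breaksB.tail := rfl
    rw [hA, hB, if_pos (by omega : e ≤ (-1 : Int))]
    rfl

-- ===== VERDICT =====
theorem validate_earfcn_band_py_spec : Claim_equal_validate_earfcn_band_py := by
  intro earfcn claimed_band _
  unfold Spec_validate_earfcn_band_py validate_earfcn_band_py validate_earfcn_band_py_alt
  rw [bridge]
  cases bandNumberForB earfcn <;> simp
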